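-- pv_equiv track=rewrite | github.com/Haskkor/ADS | Rendus MP/217972-213745-1ADS-Toulouse-MP-MEKRAOUI_PARIZOT/217972-1ADS-Toulouse-MP/alignements.py | alignementV
-- ===== SOURCE A (Python) =====
-- def alignementV(taille,plateau,win,joueur):
--     for i in range(taille):
--         cpt=0
--         for j in range (taille):
--             if plateau[j][i] == joueur:
--                 cpt+=1
--                 if cpt == win:
--                     return True
--             else:
--                 cpt=0
--     return False
-- ===== SOURCE B (Python) =====
-- def alignementV(taille, plateau, win, joueur):
--     if win <= 0:
--         return False
--     for i in range(taille):
--         for start in range(taille - win + 1):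
--             if all(plateau[start + k][i] == joueur for k in range(win)):
--                 return True
--     return False
-- ===== Notes on version B (the rewrite author's own statement) =====
-- stated objective: alternative
-- what changed: B replaces A's running consecutive-piece counter per column with a window scan: for each column it tests every possible start row with all() over a window of length win (guarded by win <= 0 returning False).
-- outside the precondition, e.g. on alignementV(2, [[1, 1], [1]], 1, 1): A returns True, B returns True
import Mathlib
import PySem

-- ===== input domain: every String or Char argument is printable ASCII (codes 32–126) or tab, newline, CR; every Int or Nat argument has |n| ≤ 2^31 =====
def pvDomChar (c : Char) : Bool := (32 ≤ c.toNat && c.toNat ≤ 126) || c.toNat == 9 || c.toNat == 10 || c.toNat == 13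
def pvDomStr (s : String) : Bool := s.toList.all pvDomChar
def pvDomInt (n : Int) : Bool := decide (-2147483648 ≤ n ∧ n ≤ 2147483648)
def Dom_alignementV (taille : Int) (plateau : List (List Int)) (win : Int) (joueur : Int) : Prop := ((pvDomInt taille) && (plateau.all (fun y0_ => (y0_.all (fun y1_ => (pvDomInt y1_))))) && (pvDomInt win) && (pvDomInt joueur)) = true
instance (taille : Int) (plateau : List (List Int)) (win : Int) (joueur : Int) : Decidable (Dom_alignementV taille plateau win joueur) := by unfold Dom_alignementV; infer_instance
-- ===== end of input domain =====

-- B checks each column by testing every window of length win with all(), instead of A's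
-- running consecutive counter; same results, similar cost (objective: alternative).

-- ===== PORT A =====
-- plateau[j][i]; in-range under Pre_, the getD defaults are never reached there
def pvCell (plateau : List (List Int)) (j i : Int) : Int :=
  PySem.List.pyGetD (PySem.List.pyGetD plateau j []) i 0

-- inner 'for j in range(taille)' loop with counter cpt and early return True
def alignementVInner (plateau : List (List Int)) (win joueur i : Int) :
    List Int → Int → Bool
  | [], _ => false
  | j :: js, cpt =>
    if pvCell plateau j i == joueur then
      (if cpt + 1 == win then true else alignementVInner plateau win joueur i js (cpt + 1))
    else alignementVInner plateau win joueur i js 0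

-- outer 'for i in range(taille)' loop with early return True
def alignementVOuter (taille : Int) (plateau : List (List Int)) (win joueur : Int) :
    List Int → Bool
  | [] => false
  | i :: is =>
    if alignementVInner plateau win joueur i (PySem.List.pyRange 0 taille 1) 0 then true
    else alignementVOuter taille plateau win joueur is

def alignementV (taille : Int) (plateau : List (List Int)) (win : Int) (joueur : Int) : Bool :=
  alignementVOuter taille plateau win joueur (PySem.List.pyRange 0 taille 1)

-- ===== PORT B =====
-- all(plateau[start+k][i] == joueur for k in range(win))
def alignementVWindow (plateau : List (List Int)) (win joueur i s : Int) : Bool :=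
  (PySem.List.pyRange 0 win 1).all (fun k => pvCell plateau (s + k) i == joueur)

def alignementV_alt (taille : Int) (plateau : List (List Int)) (win : Int) (joueur : Int) : Bool :=
  if win ≤ 0 then false
  else (PySem.List.pyRange 0 taille 1).any (fun i =>
    (PySem.List.pyRange 0 (taille - win + 1) 1).any (fun s =>
      alignementVWindow plateau win joueur i s))

-- ===== PRECONDITION & SPEC =====
-- Pre_ excludes boards with fewer than taille rows or with a short row among the first
-- taille ones: there Python A raises IndexError, or (rarely) returns True only because an
-- early win precedes the out-of-range access.
def Pre_alignementV (taille : Int) (plateau : List (List Int)) (win : Int) (joueur : Int) : Prop :=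
  taille ≤ (plateau.length : Int) ∧
    ∀ row ∈ plateau.take taille.toNat, taille ≤ (row.length : Int)
instance (taille : Int) (plateau : List (List Int)) (win : Int) (joueur : Int) :
    Decidable (Pre_alignementV taille plateau win joueur) := by
  unfold Pre_alignementV; infer_instance

def pvWitness_alignementV : Int × List (List Int) × Int × Int := (2, [[1, 0], [1, 0]], 2, 1)

def Spec_alignementV (taille : Int) (plateau : List (List Int)) (win : Int) (joueur : Int) (out : Bool) : Prop := out = alignementV_alt taille plateau win joueur
instance (taille : Int) (plateau : List (List Int)) (win : Int) (joueur : Int) (out : Bool) : Decidable (Spec_alignementV taille plateau win joueur out) := by unfold Spec_alignementV; infer_instance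

-- ===== CLAIM (what is proved, stated in full; the proofs are below) =====
def Claim_equal_alignementV : Prop := ∀ (taille : Int) (plateau : List (List Int)) (win : Int) (joueur : Int), Dom_alignementV taille plateau win joueur → Pre_alignementV taille plateau win joueur → Spec_alignementV taille plateau win joueur (alignementV taille plateau win joueur)

-- ===== LEMMAS AND PROOFS =====

-- abstract counter loop over a Bool list (A's inner loop on the column's match-list)
def pvRunAux (w : Int) : List Bool → Int → Bool
  | [], _ => false
  | b :: bs, c => if b then (if c + 1 == w then true else pvRunAux w bs (c + 1)) else pvRunAux w bs 0

-- abstract window scan (B's inner loops on the column's match-list)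
def pvWinAny (w : Nat) (F : Nat → Bool) (m : Nat) : Bool :=
  (List.range m).any (fun s => (List.range w).all (fun k => F (s + k)))

lemma pvInner_eq_runAux (plateau : List (List Int)) (win joueur i : Int) :
    ∀ (js : List Int) (cpt : Int),
      alignementVInner plateau win joueur i js cpt
        = pvRunAux win (js.map (fun j => pvCell plateau j i == joueur)) cpt := by
  intro js
  induction js with
  | nil => intro cpt; rfl
  | cons j js ih =>
    intro cpt
    simp only [alignementVInner, List.map_cons, pvRunAux]
    split <;> [skip; exact ih 0]
    split <;> [rfl; exact ih (cpt + 1)]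

lemma pvOuter_eq_any (taille : Int) (plateau : List (List Int)) (win joueur : Int) :
    ∀ is : List Int,
      alignementVOuter taille plateau win joueur is
        = is.any (fun i => alignementVInner plateau win joueur i (PySem.List.pyRange 0 taille 1) 0) := by
  intro is
  induction is with
  | nil => rfl
  | cons i is ih =>
    simp only [alignementVOuter, List.any_cons, ih]
    split <;> simp_all

-- win ≤ 0: the counter, once incremented, is ≥ 1 and can never equal win
lemma pvRunAux_false_of_nonpos (w : Int) (hw : w ≤ 0) :
    ∀ (bs : List Bool) (c : Int), 0 ≤ c → pvRunAux w bs c = false := by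
  intro bs
  induction bs with
  | nil => intro c _; rfl
  | cons b bs ih =>
    intro c hc
    simp only [pvRunAux]
    have h1 : (c + 1 == w) = false := by simp; omega
    split
    · rw [h1]; simp; exact ih (c + 1) (by omega)
    · exact ih 0 (by omega)

-- a run of w trues cannot be a prefix of l ++ false :: r without being a prefix of l
lemma pvRep_prefix_split (r : List Bool) :
    ∀ (l : List Bool) (w : Nat),
      List.replicate w true <+: (l ++ false :: r) → List.replicate w true <+: l := by
  intro l
  induction l with
  | nil =>
    intro w h
    match w with
    | 0 => simp
    | w + 1 =>
      rw [List.replicate_succ, List.nil_append] at h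
      rcases (List.cons_prefix_cons.mp h) with ⟨h1, _⟩
      cases h1
  | cons a l ih =>
    intro w h
    match w with
    | 0 => simp
    | w + 1 =>
      rw [List.replicate_succ, List.cons_append] at h
      rcases (List.cons_prefix_cons.mp h) with ⟨h1, h2⟩
      rw [List.replicate_succ, ← h1]
      exact List.cons_prefix_cons.mpr ⟨rfl, ih w h2⟩

lemma pvRep_infix_split (r : List Bool) (w : Nat) :
    ∀ l : List Bool,
      List.replicate w true <:+: (l ++ false :: r) →
        List.replicate w true <:+: l ∨ List.replicate w true <:+: r := by
  intro l
  induction l with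
  | nil =>
    intro h
    rw [List.nil_append, List.infix_cons_iff] at h
    rcases h with h | h
    · left
      have := pvRep_prefix_split r [] w (by simpa using h)
      simpa using this.isInfix
    · right; exact h
  | cons a l ih =>
    intro h
    rw [List.cons_append, List.infix_cons_iff] at h
    rcases h with h | h
    · left
      have := pvRep_prefix_split r (a :: l) w (by simpa using h)
      exact this.isInfix
    · rcases ih h with h' | h'
      · exact Or.inl (List.infix_cons h')
      · exact Or.inr h'

-- A's counter loop finds a run iff a block of w trues is an infix (c = trues just before)
lemma pvRunAux_iff_infix (w : Nat) (hw : 0 < w) :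
    ∀ (bs : List Bool) (c : Nat), c < w →
      (pvRunAux (w : Int) bs (c : Int) = true ↔
        List.replicate w true <:+: (List.replicate c true ++ bs)) := by
  intro bs
  induction bs with
  | nil =>
    intro c hc
    simp only [pvRunAux]
    constructor
    · intro h; cases h
    · intro h
      rw [List.append_nil] at h
      have := h.length_le
      simp at this; omega
  | cons b bs ih =>
    intro c hc
    simp only [pvRunAux]
    have hrw : List.replicate c true ++ b :: bs
        = List.replicate c true ++ [b] ++ bs := by simp
    cases b with
    | false =>
      simp only [if_false, Bool.false_eq_true]
      have ih0 := ih 0 hw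
      simp only [Nat.cast_zero, List.replicate_zero, List.nil_append] at ih0
      rw [ih0]
      constructor
      · intro h
        rcases h with ⟨s, t, hst⟩
        exact ⟨List.replicate c true ++ [false] ++ s, t, by simp [← hst]⟩
      · intro h
        rw [hrw] at h
        rcases pvRep_infix_split bs w (List.replicate c true) (by simpa using h) with h' | h'
        · have := h'.length_le; simp at this; omega
        · exact h'
    | true =>
      simp only [if_true]
      by_cases hcw : c + 1 = w
      · have : ((c : Int) + 1 == (w : Int)) = true := by simp; omega
        rw [this]
        simp only [if_true, true_iff]
        refine ⟨[], bs, ?_⟩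
        have : List.replicate w true = List.replicate c true ++ [true] := by
          rw [← hcw, List.replicate_succ']
        rw [this]; simp
      · have hne : ((c : Int) + 1 == (w : Int)) = false := by simp; omega
        rw [hne]
        simp only [Bool.false_eq_true, if_false]
        have : ((c : Int) + 1) = ((c + 1 : Nat) : Int) := by push_cast; ring
        rw [this, ih (c + 1) (by omega)]
        rw [hrw, ← List.replicate_succ']

-- B's window scan finds a window iff a block of w trues is an infix of the column list
lemma pvWinAny_iff_infix (w n : Nat) (F : Nat → Bool) (hw : 0 < w) :
    pvWinAny w F (n + 1 - w) = true ↔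
      List.replicate w true <:+: (List.range n).map F := by
  unfold pvWinAny
  rw [List.any_eq_true]
  constructor
  · rintro ⟨s, hs, hall⟩
    rw [List.mem_range] at hs
    rw [List.all_eq_true] at hall
    have hsw : s + w ≤ n := by omega
    refine ⟨((List.range n).map F).take s, ((List.range n).map F).drop (s + w), ?_⟩
    have hmid : List.replicate w true = (((List.range n).map F).drop s).take w := by
      apply List.ext_getElem
      · simp; omega
      · intro k h1 h2
        simp only [List.getElem_replicate, List.getElem_take, List.getElem_drop,
          List.getElem_map, List.getElem_range]
        have hk : k < w := by simpa using h1
        exact (hall _ (List.mem_range.mpr hk)).symm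
    rw [hmid]
    rw [← List.drop_drop, List.append_assoc, List.take_append_drop, List.take_append_drop]
  · rintro ⟨u, t, hut⟩
    have hlen : u.length + (w + t.length) = n := by
      have := congrArg List.length hut
      simpa [Nat.add_assoc] using this
    refine ⟨u.length, List.mem_range.mpr (by omega), ?_⟩
    rw [List.all_eq_true]
    intro k hk
    rw [List.mem_range] at hk
    have h1 : F (u.length + k) = ((List.range n).map F)[u.length + k]'(by simp; omega) := by
      simp
    rw [h1]
    have h2 : ((List.range n).map F)[u.length + k]'(by simp; omega)
        = (u ++ (List.replicate w true ++ t))[u.length + k]'(by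
            rw [List.append_assoc] at hut; rw [hut]; simp; omega) := by
      rw [List.append_assoc] at hut
      simp only [hut]
    rw [h2, List.getElem_append_right (by omega)]
    have h3 : u.length + k - u.length = k := by omega
    simp only [h3]
    rw [List.getElem_append_left (by simpa using hk)]
    simp

-- per-column equality of the two inner computations, for 0 < win
lemma pvColumn_eq (taille : Int) (plateau : List (List Int)) (win joueur i : Int)
    (hw : 0 < win) :
    alignementVInner plateau win joueur i (PySem.List.pyRange 0 taille 1) 0
      = (PySem.List.pyRange 0 (taille - win + 1) 1).any
          (fun s => alignementVWindow plateau win joueur i s) := by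
  set n := taille.toNat with hn
  set w := win.toNat with hwn
  have hwi : win = (w : Int) := by omega
  -- A side
  rw [pvInner_eq_runAux]
  rw [PySem.List.pyRange_one]
  have hta : (taille - 0).toNat = n := by omega
  rw [hta, List.map_map]
  have hA : ((fun j => pvCell plateau j i == joueur) ∘ fun k : Nat => (0 : Int) + (k : Int))
      = fun k : Nat => pvCell plateau (k : Int) i == joueur := by
    funext k; simp
  rw [hA]
  -- B side
  conv_rhs =>
    rw [PySem.List.pyRange_one, List.any_map]
  have hm : (taille - win + 1 - 0).toNat = n + 1 - w := by omega
  rw [hm]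
  have hB : ∀ s' : Nat,
      ((fun s => alignementVWindow plateau win joueur i s) ∘ fun k : Nat => (0 : Int) + (k : Int)) s'
        = (List.range w).all (fun k => pvCell plateau ((s' + k : Nat) : Int) i == joueur) := by
    intro s'
    simp only [Function.comp, zero_add, alignementVWindow]
    rw [PySem.List.pyRange_one]
    have : (win - 0).toNat = w := by omega
    rw [this, List.all_map]
    congr 1
    funext k
    simp only [Function.comp, zero_add]
    have hsk : ((s' + k : Nat) : Int) = (s' : Int) + (k : Int) := by push_cast; ring
    rw [hsk]
  have hBfun : ((fun s => alignementVWindow plateau win joueur i s) ∘ fun k : Nat => (0 : Int) + (k : Int))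
      = fun s' : Nat => (List.range w).all (fun k => pvCell plateau ((s' + k : Nat) : Int) i == joueur) := by
    funext s'; exact hB s'
  rw [hBfun]
  -- abstract equivalence
  have hw' : 0 < w := by omega
  have h1 := pvRunAux_iff_infix w hw' ((List.range n).map (fun k : Nat => pvCell plateau (k : Int) i == joueur)) 0 hw'
  simp only [List.replicate_zero, List.nil_append, Nat.cast_zero] at h1
  have h2 := pvWinAny_iff_infix w n (fun k : Nat => pvCell plateau (k : Int) i == joueur) hw'
  unfold pvWinAny at h2
  rw [hwi]
  rw [Bool.eq_iff_iff, h1, ← h2]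

-- ===== VERDICT (by name: the statement is the Claim_ definition above) =====
theorem alignementV_spec : Claim_equal_alignementV := by
  intro taille plateau win joueur _hdom _hpre
  unfold Spec_alignementV alignementV alignementV_alt
  by_cases hw : win ≤ 0
  · rw [if_pos hw, pvOuter_eq_any]
    rw [List.any_eq_false]
    intro i _
    rw [pvInner_eq_runAux, pvRunAux_false_of_nonpos win hw _ 0 le_rfl]
    simp
  · rw [if_neg hw, pvOuter_eq_any]
    congr 1
    funext i
    exact pvColumn_eq taille plateau win joueur i (by omega)
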